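-- pv_equiv track=rewrite | github.com/ToRaNek/Trading_Bot | config/symbols.py | get_sector
-- ===== SOURCE A (Python) =====
-- US_STOCKS = {
--     "tech": [
--         "AAPL",   # Apple
--         "MSFT",   # Microsoft
--         "GOOGL",  # Alphabet
--         "AMZN",   # Amazon
--         "META",   # Meta
--         "NVDA",   # NVIDIA
--         "TSLA",   # Tesla
--         "AMD",    # AMD
--         "INTC",   # Intel
--         "CRM",    # Salesforce
--     ],
--     "finance": [
--         "JPM",    # JP Morgan
--         "BAC",    # Bank of America
--         "WFC",    # Wells Fargo
--         "GS",     # Goldman Sachs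
--         "MS",     # Morgan Stanley
--         "V",      # Visa
--         "MA",     # Mastercard
--     ],
--     "healthcare": [
--         "JNJ",    # Johnson & Johnson
--         "UNH",    # UnitedHealth
--         "PFE",    # Pfizer
--         "MRK",    # Merck
--         "ABBV",   # AbbVie
--     ],
--     "consumer": [
--         "WMT",    # Walmart
--         "PG",     # Procter & Gamble
--         "KO",     # Coca-Cola
--         "PEP",    # PepsiCo
--         "COST",   # Costco
--         "NKE",    # Nike
--         "MCD",    # McDonald's
--     ],
--     "industrial": [
--         "CAT",    # Caterpillar
--         "BA",     # Boeing
--         "HON",    # Honeywell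
--         "UPS",    # UPS
--         "RTX",    # Raytheon
--     ],
--     "energy": [
--         "XOM",    # Exxon Mobil
--         "CVX",    # Chevron
--         "COP",    # ConocoPhillips
--     ],
-- }
--
-- EU_STOCKS = {
--     "cac40": [
--         "AI.PA",      # Air Liquide
--         "AIR.PA",     # Airbus
--         "ALO.PA",     # Alstom
--         "MT.PA",      # ArcelorMittal
--         "CS.PA",      # AXA
--         "BNP.PA",     # BNP Paribas
--         "EN.PA",      # Bouygues
--         "CAP.PA",     # Capgemini
--         "CA.PA",      # Carrefour
--         "SGO.PA",     # Saint-Gobain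
--         "SAN.PA",     # Sanofi
--         "SU.PA",      # Schneider Electric
--         "GLE.PA",     # Societe Generale
--         "STLA.PA",    # Stellantis
--         "STM.PA",     # STMicroelectronics
--         "TEP.PA",     # Teleperformance
--         "HO.PA",      # Thales
--         "TTE.PA",     # TotalEnergies
--         "URW.PA",     # Unibail
--         "VIE.PA",     # Veolia
--         "DG.PA",      # Vinci
--         "VIV.PA",     # Vivendi
--         "WLN.PA",     # Worldline
--         "MC.PA",      # LVMH
--         "OR.PA",      # L'Oreal
--         "RI.PA",      # Pernod Ricard
--         "KER.PA",     # Kering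
--         "HMC.PA",     # Hermes
--     ],
-- }
--
-- def get_sector(symbol):
--     """Retourne le secteur d'un symbole"""
--     for sector, stocks in US_STOCKS.items():
--         if symbol in stocks:
--             return sector
--     for market, stocks in EU_STOCKS.items():
--         if symbol in stocks:
--             return market
--     return "unknown"
-- ===== SOURCE B (Python) =====
-- # Flat precomputed reverse table: symbol -> sector, one lookup per call.
-- SYMBOL_TO_SECTOR = {
--     "AAPL": "tech",
--     "MSFT": "tech",
--     "GOOGL": "tech",
--     "AMZN": "tech",
--     "META": "tech",
--     "NVDA": "tech",
--     "TSLA": "tech",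
--     "AMD": "tech",
--     "INTC": "tech",
--     "CRM": "tech",
--     "JPM": "finance",
--     "BAC": "finance",
--     "WFC": "finance",
--     "GS": "finance",
--     "MS": "finance",
--     "V": "finance",
--     "MA": "finance",
--     "JNJ": "healthcare",
--     "UNH": "healthcare",
--     "PFE": "healthcare",
--     "MRK": "healthcare",
--     "ABBV": "healthcare",
--     "WMT": "consumer",
--     "PG": "consumer",
--     "KO": "consumer",
--     "PEP": "consumer",
--     "COST": "consumer",
--     "NKE": "consumer",
--     "MCD": "consumer",
--     "CAT": "industrial",
--     "BA": "industrial",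
--     "HON": "industrial",
--     "UPS": "industrial",
--     "RTX": "industrial",
--     "XOM": "energy",
--     "CVX": "energy",
--     "COP": "energy",
--     "AI.PA": "cac40",
--     "AIR.PA": "cac40",
--     "ALO.PA": "cac40",
--     "MT.PA": "cac40",
--     "CS.PA": "cac40",
--     "BNP.PA": "cac40",
--     "EN.PA": "cac40",
--     "CAP.PA": "cac40",
--     "CA.PA": "cac40",
--     "SGO.PA": "cac40",
--     "SAN.PA": "cac40",
--     "SU.PA": "cac40",
--     "GLE.PA": "cac40",
--     "STLA.PA": "cac40",
--     "STM.PA": "cac40",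
--     "TEP.PA": "cac40",
--     "HO.PA": "cac40",
--     "TTE.PA": "cac40",
--     "URW.PA": "cac40",
--     "VIE.PA": "cac40",
--     "DG.PA": "cac40",
--     "VIV.PA": "cac40",
--     "WLN.PA": "cac40",
--     "MC.PA": "cac40",
--     "OR.PA": "cac40",
--     "RI.PA": "cac40",
--     "KER.PA": "cac40",
--     "HMC.PA": "cac40",
-- }
--
-- def get_sector(symbol):
--     """Retourne le secteur d'un symbole"""
--     return SYMBOL_TO_SECTOR.get(symbol, "unknown")
-- ===== Notes on version B (the rewrite author's own statement) =====
-- stated objective: idiomatic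
-- what changed: Replaced A's per-call scan over two dicts of per-sector symbol lists with a single flat precomputed reverse table (symbol -> sector) queried by a single dict .get with a default.
import Mathlib
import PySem

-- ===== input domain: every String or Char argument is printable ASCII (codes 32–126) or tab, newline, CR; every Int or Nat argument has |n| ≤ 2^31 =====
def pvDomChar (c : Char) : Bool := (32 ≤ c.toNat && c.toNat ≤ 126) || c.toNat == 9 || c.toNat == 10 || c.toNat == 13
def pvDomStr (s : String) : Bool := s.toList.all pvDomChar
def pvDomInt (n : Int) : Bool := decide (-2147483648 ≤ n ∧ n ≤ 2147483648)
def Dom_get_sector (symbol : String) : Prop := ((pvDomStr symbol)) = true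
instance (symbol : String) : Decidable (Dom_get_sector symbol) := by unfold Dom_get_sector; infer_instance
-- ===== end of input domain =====

-- B replaces A's per-call scan over the sector lists with a single flat reverse table
-- (symbol -> sector) and a single dict lookup with a default (idiomatic; same result).


-- ===== PORT A =====
def US_STOCKS : List (String × List String) :=
  [("tech", ["AAPL","MSFT","GOOGL","AMZN","META","NVDA","TSLA","AMD","INTC","CRM"]),
   ("finance", ["JPM","BAC","WFC","GS","MS","V","MA"]),
   ("healthcare", ["JNJ","UNH","PFE","MRK","ABBV"]),
   ("consumer", ["WMT","PG","KO","PEP","COST","NKE","MCD"]),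
   ("industrial", ["CAT","BA","HON","UPS","RTX"]),
   ("energy", ["XOM","CVX","COP"])]

def EU_STOCKS : List (String × List String) :=
  [("cac40", ["AI.PA","AIR.PA","ALO.PA","MT.PA","CS.PA","BNP.PA","EN.PA","CAP.PA",
              "CA.PA","SGO.PA","SAN.PA","SU.PA","GLE.PA","STLA.PA","STM.PA","TEP.PA",
              "HO.PA","TTE.PA","URW.PA","VIE.PA","DG.PA","VIV.PA","WLN.PA","MC.PA",
              "OR.PA","RI.PA","KER.PA","HMC.PA"])]

-- A's 'for sector, stocks in D.items(): if symbol in stocks: return sector' loop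
def pvScan : List (String × List String) → String → Option String
  | [], _ => none
  | (sector, stocks) :: rest, symbol =>
      if stocks.contains symbol then some sector else pvScan rest symbol

def get_sector (symbol : String) : String :=
  match pvScan US_STOCKS symbol with
  | some sector => sector
  | none =>
    match pvScan EU_STOCKS symbol with
    | some market => market
    | none => "unknown"

-- ===== PORT B =====
-- Source B's flat literal dict {symbol: sector}
def SYMBOL_TO_SECTOR : PySem.Dict String String := PySem.Dict.mk
  [("AAPL", "tech"),
   ("MSFT", "tech"),
   ("GOOGL", "tech"),
   ("AMZN", "tech"),
   ("META", "tech"),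
   ("NVDA", "tech"),
   ("TSLA", "tech"),
   ("AMD", "tech"),
   ("INTC", "tech"),
   ("CRM", "tech"),
   ("JPM", "finance"),
   ("BAC", "finance"),
   ("WFC", "finance"),
   ("GS", "finance"),
   ("MS", "finance"),
   ("V", "finance"),
   ("MA", "finance"),
   ("JNJ", "healthcare"),
   ("UNH", "healthcare"),
   ("PFE", "healthcare"),
   ("MRK", "healthcare"),
   ("ABBV", "healthcare"),
   ("WMT", "consumer"),
   ("PG", "consumer"),
   ("KO", "consumer"),
   ("PEP", "consumer"),
   ("COST", "consumer"),
   ("NKE", "consumer"),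
   ("MCD", "consumer"),
   ("CAT", "industrial"),
   ("BA", "industrial"),
   ("HON", "industrial"),
   ("UPS", "industrial"),
   ("RTX", "industrial"),
   ("XOM", "energy"),
   ("CVX", "energy"),
   ("COP", "energy"),
   ("AI.PA", "cac40"),
   ("AIR.PA", "cac40"),
   ("ALO.PA", "cac40"),
   ("MT.PA", "cac40"),
   ("CS.PA", "cac40"),
   ("BNP.PA", "cac40"),
   ("EN.PA", "cac40"),
   ("CAP.PA", "cac40"),
   ("CA.PA", "cac40"),
   ("SGO.PA", "cac40"),
   ("SAN.PA", "cac40"),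
   ("SU.PA", "cac40"),
   ("GLE.PA", "cac40"),
   ("STLA.PA", "cac40"),
   ("STM.PA", "cac40"),
   ("TEP.PA", "cac40"),
   ("HO.PA", "cac40"),
   ("TTE.PA", "cac40"),
   ("URW.PA", "cac40"),
   ("VIE.PA", "cac40"),
   ("DG.PA", "cac40"),
   ("VIV.PA", "cac40"),
   ("WLN.PA", "cac40"),
   ("MC.PA", "cac40"),
   ("OR.PA", "cac40"),
   ("RI.PA", "cac40"),
   ("KER.PA", "cac40"),
   ("HMC.PA", "cac40")]

def get_sector_alt (symbol : String) : String :=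
  SYMBOL_TO_SECTOR.getD symbol "unknown"

-- ===== PRECONDITION & SPEC =====
def Spec_get_sector (symbol : String) (out : String) : Prop := out = get_sector_alt symbol
instance (symbol : String) (out : String) : Decidable (Spec_get_sector symbol out) := by unfold Spec_get_sector; infer_instance

-- ===== CLAIM (what is proved, stated in full; the proofs are below) =====
def Claim_equal_get_sector : Prop := ∀ (symbol : String), Dom_get_sector symbol → Spec_get_sector symbol (get_sector symbol)

-- ===== LEMMAS AND PROOFS =====

-- the flattening that relates A's nested data to B's flat table
def pvFlat (ds : List (String × List String)) : List (String × String) :=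
  ds.flatMap (fun p => p.2.map (fun s => (s, p.1)))

theorem get?_mk_append (l1 l2 : List (String × String)) (x : String) :
    (PySem.Dict.mk (l1 ++ l2)).get? x
      = ((PySem.Dict.mk l1).get? x).or ((PySem.Dict.mk l2).get? x) := by
  induction l1 with
  | nil => simp [PySem.Dict.get?]
  | cons p rest ih =>
    obtain ⟨k, v⟩ := p
    simp only [List.cons_append, PySem.Dict.get?_mk_cons, ih]
    by_cases h : k = x
    · simp [h]
    · simp [h]

theorem get?_mk_map_const (stocks : List String) (sector x : String) :
    (PySem.Dict.mk (stocks.map (fun s => (s, sector)))).get? x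
      = (if stocks.contains x then some sector else none) := by
  induction stocks with
  | nil => simp [PySem.Dict.get?]
  | cons s rest ih =>
    simp only [List.map_cons, PySem.Dict.get?_mk_cons, ih, List.contains_cons]
    by_cases h : s = x
    · simp [h]
    · have h' : (x == s) = false := by simp [Ne.symm h]
      simp [h, h']

theorem get?_mk_pvFlat (ds : List (String × List String)) (x : String) :
    (PySem.Dict.mk (pvFlat ds)).get? x = pvScan ds x := by
  induction ds with
  | nil => simp [pvFlat, pvScan, PySem.Dict.get?]
  | cons p rest ih =>
    obtain ⟨sector, stocks⟩ := p
    simp only [pvFlat, List.flatMap_cons] at *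
    rw [get?_mk_append, get?_mk_map_const, ih, pvScan]
    by_cases h : x ∈ stocks
    · simp [h]
    · simp [h]

theorem pvFlat_eq : pvFlat (US_STOCKS ++ EU_STOCKS) = SYMBOL_TO_SECTOR.items := by
  decide

theorem pvScan_append (l1 l2 : List (String × List String)) (x : String) :
    pvScan (l1 ++ l2) x = (pvScan l1 x).or (pvScan l2 x) := by
  induction l1 with
  | nil => simp [pvScan]
  | cons p rest ih =>
    obtain ⟨sector, stocks⟩ := p
    simp only [List.cons_append, pvScan, ih]
    by_cases h : x ∈ stocks
    · simp [h]
    · simp [h]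

-- ===== VERDICT (by name: the statement is the Claim_ definition above) =====
theorem get_sector_spec : Claim_equal_get_sector := by
  intro symbol _
  unfold Spec_get_sector get_sector get_sector_alt
  have hmk : PySem.Dict.mk SYMBOL_TO_SECTOR.items = SYMBOL_TO_SECTOR := by
    apply PySem.Dict.ext; rfl
  rw [PySem.Dict.getD_eq_get?_getD, ← hmk, ← pvFlat_eq, get?_mk_pvFlat, pvScan_append]
  cases pvScan US_STOCKS symbol <;> cases pvScan EU_STOCKS symbol <;> simp
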